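-- pv_equiv track=rewrite | github.com/woyow/selenoid-config-tool | src/configurator.py | _string_sanitize
-- ===== SOURCE A (Python) =====
-- def _string_sanitize(string: str) -> str:
--     """ Sanitize string method """
--
--     banned_symbols = [
--         '\r', '\n', '\t', '\\', '/', ' ', '<', '>', ';', ':', "'", '"',
--         '[', ']', '|', '{', '}', '(', ')', '*', '&', '^', '%', '$', '#',
--         '@', '!', '`', '~', ',', '.'
--     ]
--
--     for symbol in banned_symbols:
--         string = string.replace(symbol, '')
--
--     return string
-- ===== SOURCE B (Python) =====
-- def _string_sanitize(string: str) -> str: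
--     """ Sanitize string method """
--
--     banned = set('\r\n\t\\/ <>;:\'"[]|{}()*&^%$#@!`~,.')
--     return ''.join(ch for ch in string if ch not in banned)
-- ===== Notes on version B (the rewrite author's own statement) =====
-- stated objective: simpler
-- what changed: Replaces 30 successive whole-string .replace passes (one per banned symbol) with a single pass over the input that keeps characters not in a precomputed banned set.
import Mathlib
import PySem

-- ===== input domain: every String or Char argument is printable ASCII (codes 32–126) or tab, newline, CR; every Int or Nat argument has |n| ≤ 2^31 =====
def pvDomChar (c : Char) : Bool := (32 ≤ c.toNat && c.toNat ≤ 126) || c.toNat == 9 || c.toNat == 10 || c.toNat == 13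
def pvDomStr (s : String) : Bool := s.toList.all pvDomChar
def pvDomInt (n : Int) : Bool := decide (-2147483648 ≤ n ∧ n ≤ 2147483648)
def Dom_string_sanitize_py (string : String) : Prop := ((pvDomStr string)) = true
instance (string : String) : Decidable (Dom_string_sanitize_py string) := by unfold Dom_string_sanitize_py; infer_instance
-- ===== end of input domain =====

-- B replaces A's 30 successive whole-string .replace passes by one filtering pass
-- over the input against a precomputed banned-character set (objective: simpler).

-- ===== PORT A =====
-- A's banned_symbols list (a list of one-character strings, as in the Python)
def pvBannedSymbols : List String :=
  ["\r", "\n", "\t", "\\", "/", " ", "<", ">", ";", ":", "'", "\"",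
   "[", "]", "|", "{", "}", "(", ")", "*", "&", "^", "%", "$", "#",
   "@", "!", "`", "~", ",", "."]

def string_sanitize_py (string : String) : String :=
  pvBannedSymbols.foldl (fun s symbol => PySem.Str.replace s symbol "") string

-- ===== PORT B =====
-- B's banned set of characters (Python: set('...'))
def pvBannedSet : PySem.Set Char :=
  PySem.Set.ofList
    ['\r', '\n', '\t', '\\', '/', ' ', '<', '>', ';', ':', '\'', '\"',
     '[', ']', '|', '{', '}', '(', ')', '*', '&', '^', '%', '$', '#',
     '@', '!', '`', '~', ',', '.']

def string_sanitize_py_alt (string : String) : String :=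
  String.ofList (string.toList.filter (fun ch => !(PySem.Set.contains pvBannedSet ch)))

-- ===== PRECONDITION & SPEC =====
def Spec_string_sanitize_py (string : String) (out : String) : Prop := out = string_sanitize_py_alt string
instance (string : String) (out : String) : Decidable (Spec_string_sanitize_py string out) := by unfold Spec_string_sanitize_py; infer_instance

-- ===== CLAIM (what is proved, stated in full; the proofs are below) =====
def Claim_equal_string_sanitize_py : Prop := ∀ (string : String), Dom_string_sanitize_py string → Spec_string_sanitize_py string (string_sanitize_py string)

-- ===== LEMMAS AND PROOFS =====

-- A's banned symbols as characters, for reasoning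
def pvBannedChars : List Char :=
  ['\r', '\n', '\t', '\\', '/', ' ', '<', '>', ';', ':', '\'', '\"',
   '[', ']', '|', '{', '}', '(', ')', '*', '&', '^', '%', '$', '#',
   '@', '!', '`', '~', ',', '.']

-- replace.go with a single-character pattern and empty replacement is a filter
theorem replace_go_single (b : Char) :
    ∀ (l : List Char) (fuel : Nat) (acc : List Char), l.length ≤ fuel →
      PySem.Chars.replace.go [b] [] fuel l acc = acc.reverse ++ l.filter (· ≠ b) := by
  intro l
  induction l with
  | nil =>
      intro fuel acc _
      cases fuel <;> simp [PySem.Chars.replace.go]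
  | cons c t ih =>
      intro fuel acc hle
      cases fuel with
      | zero => simp at hle
      | succ n =>
        rw [PySem.Chars.replace.go]
        by_cases hbc : b = c
        · subst hbc
          simp only [List.isPrefixOf, BEq.rfl, Bool.true_and, List.length_cons, if_true]
          have hd : List.drop (([] : List Char).length + 1) (b :: t) = t := rfl
          have ha : ([] : List Char).reverse ++ acc = acc := rfl
          rw [hd, ha, ih n acc (by simpa using hle)]
          simp
        · have hpf : List.isPrefixOf [b] (c :: t) = false := by
            simp [List.isPrefixOf]; exact fun h => absurd h hbc
          rw [if_neg (by simp [hpf])]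
          rw [ih n (c :: acc) (by simpa using hle)]
          simp [Ne.symm hbc]

-- single-char replace with "" = filter out that char
theorem replace_single_char (s : List Char) (b : Char) :
    PySem.Chars.replace s [b] [] = s.filter (· ≠ b) := by
  rw [PySem.Chars.replace]
  simp [replace_go_single b s s.length [] (le_refl _)]

-- folding single-char deletions over a list = one filter against membership
theorem foldl_filter (bl : List Char) :
    ∀ (s : List Char),
      bl.foldl (fun acc b => acc.filter (· ≠ b)) s = s.filter (fun c => !(bl.contains c)) := by
  induction bl with
  | nil => intro s; simp
  | cons b t ih =>
      intro s
      simp only [List.foldl_cons, ih, List.filter_filter]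
      apply List.filter_congr
      intro c _
      by_cases h : c = b <;> simp [h]

-- a fold of one-character .replace-with-"" steps, at the character level, is a fold of filters
theorem foldl_replace_toList :
    ∀ (syms : List String) (bs : List Char),
      syms.map String.toList = bs.map (fun b => [b]) →
      ∀ (s : String),
        (syms.foldl (fun s sym => PySem.Str.replace s sym "") s).toList
          = bs.foldl (fun acc b => acc.filter (· ≠ b)) s.toList := by
  intro syms
  induction syms with
  | nil =>
      intro bs h s
      cases bs with
      | nil => simp
      | cons b bt => simp at h
  | cons sym rest ih =>
      intro bs h s
      cases bs with
      | nil => simp at h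
      | cons b bt =>
        simp only [List.map_cons, List.cons.injEq] at h
        obtain ⟨hsym, hrest⟩ := h
        simp only [List.foldl_cons]
        rw [ih bt hrest]
        congr 1
        rw [PySem.Str.toList_replace, hsym,
          show ("" : String).toList = ([] : List Char) from rfl,
          replace_single_char]

-- A computes, at the character level, the fold of single-char deletions over pvBannedChars
theorem toList_A (s : String) :
    (string_sanitize_py s).toList
      = pvBannedChars.foldl (fun acc b => acc.filter (· ≠ b)) s.toList := by
  unfold string_sanitize_py
  exact foldl_replace_toList pvBannedSymbols pvBannedChars rfl s

set_option maxRecDepth 100000 in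
set_option maxHeartbeats 1000000 in
theorem banned_set_eq : pvBannedSet = (pvBannedChars : List Char) := by decide

theorem string_sanitize_py_eq_alt (s : String) :
    string_sanitize_py s = string_sanitize_py_alt s := by
  apply String.toList_inj.mp
  rw [toList_A, foldl_filter]
  unfold string_sanitize_py_alt
  rw [String.toList_ofList]
  apply List.filter_congr
  intro c _
  rw [show PySem.Set.contains pvBannedSet c = pvBannedChars.contains c from by
    rw [banned_set_eq]; rfl]

-- ===== VERDICT (by name: the statement is the Claim_ definition above) =====
theorem string_sanitize_py_spec : Claim_equal_string_sanitize_py := by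
  intro s _
  unfold Spec_string_sanitize_py
  exact string_sanitize_py_eq_alt s
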